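-- pv_equiv track=rewrite | github.com/starlingx/test | automated-pytest-suite/utils/parse_log.py | parse_traceback
-- ===== SOURCE A (Python) =====
-- def parse_traceback(traceback, traceback_lines=10, search_forward=False):
--     """
--         Parses traceback for a failure up to a specified line count
--
--         Args:
--             traceback (str|list): traceback from log file / running test
--             traceback_lines (int): Number of lines to record
--             search_forward (bool): whether to search forward from last '> '
--             or search backward from first '> '
--
--         Returns (str): traceback trimmed to specified line count
--
--     """
--     collected_lines = []
--
--     if isinstance(traceback, str):
--         traceback = traceback.splitlines()
--     else:
--         traceback = list(traceback)
--
--     if search_forward: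
--         traceback.reverse()
--     for line in traceback:
--         collected_lines.append(line.strip())
--         if line.startswith('>  '):
--             collected_lines = collected_lines[-traceback_lines:]
--             if search_forward:
--                 collected_lines.reverse()
--             collected_lines.insert(0, '---FAILURE TRACEBACK---')
--             break
--
--     return '\n'.join(collected_lines)
-- ===== SOURCE B (Python) =====
-- def parse_traceback(traceback, traceback_lines=10, search_forward=False):
--     lines = traceback.splitlines() if isinstance(traceback, str) else list(traceback)
--     if search_forward:
--         lines = list(reversed(lines))
--     stripped = [l.strip() for l in lines]
--     markers = [i for i, l in enumerate(lines) if l.startswith('>  ')]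
--     if not markers:
--         return '\n'.join(stripped)
--     window = stripped[:markers[0] + 1][-traceback_lines:]
--     if search_forward:
--         window = list(reversed(window))
--     return '\n'.join(['---FAILURE TRACEBACK---'] + window)
-- ===== Notes on version B (the rewrite author's own statement) =====
-- stated objective: alternative
-- what changed: Replaces A's stateful single pass with in-loop trim and break by three stateless staged passes: strip every line, collect the list of all marker indices, then slice the stripped list at the first marker; B always traverses the whole input where A stops at the marker.
import Mathlib
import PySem

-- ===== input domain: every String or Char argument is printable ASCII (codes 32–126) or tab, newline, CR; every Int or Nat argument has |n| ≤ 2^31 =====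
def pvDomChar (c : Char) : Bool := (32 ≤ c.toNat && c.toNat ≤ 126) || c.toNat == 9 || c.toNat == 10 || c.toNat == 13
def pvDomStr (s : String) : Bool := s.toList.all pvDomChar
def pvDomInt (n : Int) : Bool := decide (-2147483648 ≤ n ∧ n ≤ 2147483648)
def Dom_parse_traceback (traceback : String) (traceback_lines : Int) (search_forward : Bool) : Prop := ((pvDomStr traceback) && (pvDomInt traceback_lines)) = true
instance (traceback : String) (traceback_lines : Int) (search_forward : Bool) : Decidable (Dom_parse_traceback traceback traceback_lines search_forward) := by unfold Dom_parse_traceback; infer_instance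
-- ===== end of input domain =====

-- B replaces A's stateful single pass (accumulate, trim and break inside the loop) by three
-- stateless staged passes: strip all lines, list all marker indices, then slice at the first
-- marker (objective: alternative).


-- ===== PORT A =====
-- A's for-loop with break: structural recursion over the line list, carrying collected_lines.
def pvALoop (traceback_lines : Int) (search_forward : Bool) :
    List String → List String → List String
  | [], acc => acc
  | l :: rest, acc =>
    let acc' := acc ++ [PySem.Str.strip l]
    if PySem.Str.startswith l ">  " then
      let c := PySem.List.slice acc' (some (-traceback_lines)) none
      let c := if search_forward then c.reverse else c
      "---FAILURE TRACEBACK---" :: c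
    else
      pvALoop traceback_lines search_forward rest acc'

def parse_traceback (traceback : String) (traceback_lines : Int) (search_forward : Bool) : String :=
  let tb := PySem.Str.splitlines traceback
  let tb := if search_forward then tb.reverse else tb
  PySem.Str.join "\n" (pvALoop traceback_lines search_forward tb [])

-- ===== PORT B =====
-- staged passes: strip every line; collect all marker indices; slice at the first one.
def parse_traceback_alt (traceback : String) (traceback_lines : Int) (search_forward : Bool) : String :=
  let lines0 := PySem.Str.splitlines traceback
  let lines := if search_forward then lines0.reverse else lines0
  let stripped := lines.map PySem.Str.strip
  let markers := ((PySem.List.enumerate lines).filter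
      (fun p => PySem.Str.startswith p.2 ">  ")).map (·.1)
  match markers with
  | [] => PySem.Str.join "\n" stripped
  | j :: _ =>
    let window := PySem.List.slice (PySem.List.slice stripped none (some (j + 1)))
        (some (-traceback_lines)) none
    let window := if search_forward then window.reverse else window
    PySem.Str.join "\n" ("---FAILURE TRACEBACK---" :: window)

-- ===== PRECONDITION & SPEC =====
def Spec_parse_traceback (traceback : String) (traceback_lines : Int) (search_forward : Bool) (out : String) : Prop := out = parse_traceback_alt traceback traceback_lines search_forward
instance (traceback : String) (traceback_lines : Int) (search_forward : Bool) (out : String) : Decidable (Spec_parse_traceback traceback traceback_lines search_forward out) := by unfold Spec_parse_traceback; infer_instance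

-- ===== CLAIM =====
def Claim_equal_parse_traceback : Prop := ∀ (traceback : String) (traceback_lines : Int) (search_forward : Bool), Dom_parse_traceback traceback traceback_lines search_forward → Spec_parse_traceback traceback traceback_lines search_forward (parse_traceback traceback traceback_lines search_forward)

-- ===== LEMMAS AND PROOFS =====
-- A's loop, characterised by the position of the first marker line.
theorem pvALoop_eq (tl : Int) (sf : Bool) (lines acc : List String) :
    pvALoop tl sf lines acc =
      match lines.findIdx? (fun l => PySem.Str.startswith l ">  ") with
      | none => acc ++ lines.map PySem.Str.strip
      | some i =>
        let w := PySem.List.slice (acc ++ (lines.take (i + 1)).map PySem.Str.strip)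
                   (some (-tl)) none
        "---FAILURE TRACEBACK---" :: (if sf then w.reverse else w) := by
  induction lines generalizing acc with
  | nil => simp [pvALoop]
  | cons l rest ih =>
    by_cases h : PySem.Chars.startswith l.toList ['>', ' ', ' '] = true
    · simp [pvALoop, h, List.findIdx?_cons]
    · simp only [pvALoop, h, List.findIdx?_cons, if_neg, Bool.false_eq_true, ite_false,
        ih (acc ++ [PySem.Str.strip l])]
      cases hf : rest.findIdx? (fun l => PySem.Str.startswith l ">  ") with
      | none => simp [hf, h]
      | some i => simp [hf, h, List.append_assoc]

-- B's list of marker indices, headed by exactly A's first-marker index.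
theorem markers_head (p : String → Bool) (xs : List String) (s : Int) :
    (((PySem.List.enumerate xs s).filter (fun q => p q.2)).map (·.1)).head? =
      (xs.findIdx? p).map (fun i => s + (i : Int)) := by
  induction xs generalizing s with
  | nil => simp [PySem.List.enumerate_nil]
  | cons x xs ih =>
    by_cases h : p x = true
    · simp [PySem.List.enumerate_cons, h, List.findIdx?_cons]
    · simp only [PySem.List.enumerate_cons, List.filter_cons, h, Bool.false_eq_true,
        ite_false, List.findIdx?_cons, ih (s + 1)]
      cases hf : xs.findIdx? p with
      | none => simp [hf]
      | some i => simp [hf]; omega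

theorem parse_traceback_spec : Claim_equal_parse_traceback := by
  intro tb tl sf _
  unfold Spec_parse_traceback parse_traceback parse_traceback_alt
  simp only [pvALoop_eq]
  set lines := if sf then (PySem.Str.splitlines tb).reverse else PySem.Str.splitlines tb with hl
  have hm := markers_head (fun l => PySem.Str.startswith l ">  ") lines 0
  cases hf : lines.findIdx? (fun l => PySem.Str.startswith l ">  ") with
  | none =>
    rw [hf] at hm
    cases hms : ((PySem.List.enumerate lines).filter
        (fun p => PySem.Str.startswith p.2 ">  ")).map (·.1) with
    | nil => simp
    | cons j js => rw [hms] at hm; simp at hm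
  | some i =>
    rw [hf] at hm
    cases hms : ((PySem.List.enumerate lines).filter
        (fun p => PySem.Str.startswith p.2 ">  ")).map (·.1) with
    | nil => rw [hms] at hm; simp at hm
    | cons j js =>
      rw [hms] at hm
      simp only [List.head?_cons] at hm
      have hj : j = (i : Int) := by simp [Option.map] at hm; omega
      subst hj
      have hcast : ((i : Int) + 1) = ((i + 1 : Nat) : Int) := by push_cast; ring
      simp only [List.nil_append, hcast, PySem.List.slice_to_natCast, List.map_take]
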